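-- pv_equiv track=rewrite | github.com/Yuan134/Yuan-Chan | Lab2/check_errors.py | check_int_exp_parentheses
-- ===== SOURCE A (Python) =====
-- def check_int_exp_parentheses(char_str: str):
--     """
--     Checks for valid parenthesis configuration - all opening brackets matched by closing brackets
--     :param char_str: Prefix expression string
--     :return: Error message if invalid parentheses configuration detected
--     """
--     # Initialize counter to check bracket configuration. 0 for valid configuration.
--     # Add 1 for opening bracket, minus 1 for closing bracket
--     bracket_depth = 0
--     valid = True  # Set as default until illegal bracket configuration detected
--
--     for item in char_str:
--         if item == '(':
--             bracket_depth += 1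
--         elif item == ')':
--             bracket_depth -= 1
--
--         if bracket_depth > 1:  # Invalid parentheses configuration detected
--             valid = False
--
--     if valid is False:  # Successive opening brackets without paired closing brackets
--         error_msg = "\nIllegal parentheses configuration! Successive opening brackets \'(\' " \
--                     "without matching closing brackets \')\'!"
--         return error_msg
--
--     else:  # Bracket depth is zero - all opening parentheses having paired closing parentheses
--         return None
-- ===== SOURCE B (Python) =====
-- ERROR_MSG = "\nIllegal parentheses configuration! Successive opening brackets \'(\' " \
--             "without matching closing brackets \')\'!"
--
--
-- def _scan(s):
--     """Divide and conquer: returns (total delta, max prefix depth incl. empty prefix)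
--     of the substring; combine rule M(uv) = max(M(u), T(u)+M(v))."""
--     n = len(s)
--     if n == 0:
--         return (0, 0)
--     if n == 1:
--         d = 1 if s == '(' else -1 if s == ')' else 0
--         return (d, max(0, d))
--     mid = n // 2
--     t1, m1 = _scan(s[:mid])
--     t2, m2 = _scan(s[mid:])
--     return (t1 + t2, max(m1, t1 + m2))
--
--
-- def check_int_exp_parentheses(char_str: str):
--     if _scan(char_str)[1] > 1:
--         return ERROR_MSG
--     return None
-- ===== Notes on version B (the rewrite author's own statement) =====
-- stated objective: alternative
-- what changed: Replaces A's left-to-right stateful scan (depth counter + validity flag) by a divide-and-conquer computation of (total delta, max prefix depth) on string halves, combined with M(uv)=max(M(u),T(u)+M(v)); error iff the max prefix depth exceeds 1.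
import Mathlib
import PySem

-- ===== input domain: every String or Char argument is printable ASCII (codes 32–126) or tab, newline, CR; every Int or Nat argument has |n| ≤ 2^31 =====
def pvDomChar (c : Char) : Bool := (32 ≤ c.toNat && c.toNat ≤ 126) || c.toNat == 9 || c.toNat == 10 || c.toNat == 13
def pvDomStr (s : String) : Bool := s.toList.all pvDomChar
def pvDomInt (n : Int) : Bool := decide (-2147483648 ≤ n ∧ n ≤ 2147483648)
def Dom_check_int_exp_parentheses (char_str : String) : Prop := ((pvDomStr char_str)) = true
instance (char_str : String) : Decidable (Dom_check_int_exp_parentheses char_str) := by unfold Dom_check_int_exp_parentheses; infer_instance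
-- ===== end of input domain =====

-- B replaces A's stateful left-to-right scan by a divide-and-conquer computation of
-- (total delta, max prefix depth) over string halves; same return value.
-- ===== PORT A =====
def pvErrMsg : String := "\nIllegal parentheses configuration! Successive opening brackets '(' without matching closing brackets ')'!"

def check_int_exp_parentheses (char_str : String) : Option String :=
  let st := char_str.toList.foldl
    (fun (p : Int × Bool) item =>
      let d : Int := if item = '(' then p.1 + 1 else if item = ')' then p.1 - 1 else p.1
      (d, if d > 1 then false else p.2))
    (0, true)
  if st.2 = false then some pvErrMsg else none

-- ===== PORT B =====
def pvDelta (c : Char) : Int := if c = '(' then 1 else if c = ')' then -1 else 0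

-- divide and conquer: (total delta, max prefix depth including the empty prefix)
def pvScanDC : List Char → Int × Int
  | [] => (0, 0)
  | [c] => (pvDelta c, max 0 (pvDelta c))
  | a :: b :: l =>
    let s := a :: b :: l
    let mid := s.length / 2
    let p1 := pvScanDC (s.take mid)
    let p2 := pvScanDC (s.drop mid)
    (p1.1 + p2.1, max p1.2 (p1.1 + p2.2))
termination_by l => l.length
decreasing_by
  · simp only [List.length_take]; simp; omega
  · simp only [List.length_drop]; simp; omega

def check_int_exp_parentheses_alt (char_str : String) : Option String :=
  if (pvScanDC char_str.toList).2 > 1 then some pvErrMsg else none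

-- ===== PRECONDITION & SPEC =====
def Spec_check_int_exp_parentheses (char_str : String) (out : Option String) : Prop := out = check_int_exp_parentheses_alt char_str
instance (char_str : String) (out : Option String) : Decidable (Spec_check_int_exp_parentheses char_str out) := by unfold Spec_check_int_exp_parentheses; infer_instance

-- ===== CLAIM (what is proved, stated in full; the proofs are below) =====
def Claim_equal_check_int_exp_parentheses : Prop := ∀ (char_str : String), Dom_check_int_exp_parentheses char_str → Spec_check_int_exp_parentheses char_str (check_int_exp_parentheses char_str)

-- ===== LEMMAS AND PROOFS =====

-- total delta of a list
def pvT (l : List Char) : Int := (l.map pvDelta).sum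

-- max prefix depth (including the empty prefix), cons recursion
def pvM : List Char → Int
  | [] => 0
  | c :: l => max 0 (pvDelta c + pvM l)

theorem pvM_nonneg (l : List Char) : 0 ≤ pvM l := by
  cases l <;> simp [pvM]

theorem pvM_append (u v : List Char) : pvM (u ++ v) = max (pvM u) (pvT u + pvM v) := by
  induction u with
  | nil =>
    simp [pvM, pvT]
    exact pvM_nonneg v
  | cons c u ih =>
    simp only [List.cons_append, pvM, ih, pvT, List.map_cons, List.sum_cons]
    omega

theorem pvT_append (u v : List Char) : pvT (u ++ v) = pvT u + pvT v := by
  simp [pvT]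

-- the divide-and-conquer function computes (pvT, pvM)
theorem pvScanDC_eq (l : List Char) : pvScanDC l = (pvT l, pvM l) := by
  induction l using pvScanDC.induct with
  | case1 => simp [pvScanDC, pvT, pvM]
  | case2 c => rw [pvScanDC]; simp [pvT, pvM]
  | case3 a b l s mid ih1 ih2 =>
    have i1 : pvScanDC (List.take ((a :: b :: l).length / 2) (a :: b :: l)) =
        (pvT (List.take ((a :: b :: l).length / 2) (a :: b :: l)),
         pvM (List.take ((a :: b :: l).length / 2) (a :: b :: l))) := ih1
    have i2 : pvScanDC (List.drop ((a :: b :: l).length / 2) (a :: b :: l)) =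
        (pvT (List.drop ((a :: b :: l).length / 2) (a :: b :: l)),
         pvM (List.drop ((a :: b :: l).length / 2) (a :: b :: l))) := ih2
    rw [pvScanDC]
    simp only [i1, i2]
    have h := List.take_append_drop ((a :: b :: l).length / 2) (a :: b :: l)
    conv_rhs => rw [← h]
    rw [pvT_append, pvM_append]

-- the list of running depths starting at a (characterises A's loop)
def pvScan (a : Int) : List Char → List Int
  | [] => []
  | c :: l => (a + pvDelta c) :: pvScan (a + pvDelta c) l

-- A's flag is false iff it was already false or some running depth exceeds 1
theorem pv_foldl_snd (l : List Char) (a : Int) (b : Bool) :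
    ((l.foldl
      (fun (p : Int × Bool) item =>
        let d : Int := if item = '(' then p.1 + 1 else if item = ')' then p.1 - 1 else p.1
        (d, if d > 1 then false else p.2))
      (a, b)).2 = false)
    ↔ (b = false ∨ ∃ d ∈ pvScan a l, 1 < d) := by
  induction l generalizing a b with
  | nil => simp [pvScan]
  | cons c l ih =>
    have hd : (if c = '(' then a + 1 else if c = ')' then a - 1 else a) = a + pvDelta c := by
      unfold pvDelta; split_ifs <;> ring
    simp only [List.foldl_cons, hd]
    rw [ih]
    simp only [pvScan, List.mem_cons]
    by_cases h1 : (1:Int) < a + pvDelta c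
    · simp only [if_pos h1]
      constructor
      · intro _; exact Or.inr ⟨a + pvDelta c, Or.inl rfl, h1⟩
      · intro _; exact Or.inl trivial
    · simp only [if_neg h1]
      constructor
      · rintro (hb | ⟨d, hm, hdd⟩)
        · exact Or.inl hb
        · exact Or.inr ⟨d, Or.inr hm, hdd⟩
      · rintro (hb | ⟨d, hm, hdd⟩)
        · exact Or.inl hb
        · rcases hm with rfl | hm
          · exact absurd hdd h1
          · exact Or.inr ⟨d, hm, hdd⟩

-- some running depth from a exceeds 1 iff 1 < a or 1 < a + pvM
theorem pv_scan_iff_M (l : List Char) (a : Int) :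
    ((∃ d ∈ pvScan a l, 1 < d) ∨ 1 < a) ↔ 1 < a + pvM l := by
  induction l generalizing a with
  | nil => simp [pvScan, pvM]
  | cons c l ih =>
    simp only [pvScan, List.mem_cons, pvM]
    have h := ih (a + pvDelta c)
    constructor
    · rintro (⟨d, rfl | hm, hdd⟩ | ha)
      · have : 1 < a + pvDelta c + pvM l := h.mp (Or.inr hdd)
        omega
      · have : 1 < a + pvDelta c + pvM l := h.mp (Or.inl ⟨d, hm, hdd⟩)
        omega
      · omega
    · intro hh
      by_cases ha : 1 < a
      · exact Or.inr ha
      · have : 1 < a + pvDelta c + pvM l := by omega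
        rcases h.mpr this with hx | hx
        · rcases hx with ⟨d, hm, hdd⟩
          exact Or.inl ⟨d, Or.inr hm, hdd⟩
        · exact Or.inl ⟨a + pvDelta c, Or.inl rfl, hx⟩

-- ===== VERDICT (by name: the statement is the Claim_ definition above) =====
theorem check_int_exp_parentheses_spec : Claim_equal_check_int_exp_parentheses := by
  intro s _
  unfold Spec_check_int_exp_parentheses check_int_exp_parentheses check_int_exp_parentheses_alt
  rw [pvScanDC_eq]
  have hiff : ((s.toList.foldl
      (fun (p : Int × Bool) item =>
        let d : Int := if item = '(' then p.1 + 1 else if item = ')' then p.1 - 1 else p.1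
        (d, if d > 1 then false else p.2))
      (0, true)).2 = false) ↔ 1 < pvM s.toList := by
    rw [pv_foldl_snd]
    have := pv_scan_iff_M s.toList 0
    simp only [zero_add] at this
    constructor
    · rintro (h | h)
      · exact absurd h (by simp)
      · exact this.mp (Or.inl h)
    · intro h
      rcases this.mpr h with hx | hx
      · exact Or.inr hx
      · omega
  by_cases h : 1 < pvM s.toList
  · rw [if_pos (hiff.mpr h)]
    simp only [gt_iff_lt]
    rw [if_pos h]
  · rw [if_neg (fun hc => h (hiff.mp hc))]
    simp only [gt_iff_lt]
    rw [if_neg h]
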